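-- pv_equiv track=rewrite | github.com/maeri18/first-years-codes | informatique/dst 2020 info l1.py | nb_annees
-- ===== SOURCE A (Python) =====
-- def est_bissextile(a:int)->bool:
--     """precondition : a>=0"""
--     if a%4==0 and a%100!=0:
--         return True
--     elif a%400==0:
--         return True
--     else:
--         return False
--
-- def nb_annees(annee_debut:int, n:int)->int:
--     """precondition : annee_debut>=0 and n>=0
--
-- """
--     n1:int=n
--     nb_annee:int=-1
--     first_year:int=annee_debut
--     while n1>0:
--         if est_bissextile(first_year):
--             n1=n1-1
--         first_year=first_year+1
--         nb_annee=nb_annee+1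
--     return nb_annee
-- ===== SOURCE B (Python) =====
-- def nb_annees(annee_debut, n):
--     if n <= 0:
--         return -1
--     def leaps_upto(y):
--         # leap years in (0, y] for y >= 0, extended to all ints by floor division
--         return y // 4 - y // 100 + y // 400
--     base = leaps_upto(annee_debut - 1)
--     lo, hi = annee_debut, annee_debut + 8 * n
--     while lo < hi:
--         mid = (lo + hi) // 2
--         if leaps_upto(mid) - base >= n:
--             hi = mid
--         else:
--             lo = mid + 1
--     return lo - annee_debut
-- ===== Notes on version B (the rewrite author's own statement) =====
-- stated objective: faster
-- what changed: A scans year by year decrementing a counter at each leap year; B computes the leap-year count up to y in closed form (y//4 - y//100 + y//400) and binary-searches for the least year at or after annee_debut whose count reaches n.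
import Mathlib
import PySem

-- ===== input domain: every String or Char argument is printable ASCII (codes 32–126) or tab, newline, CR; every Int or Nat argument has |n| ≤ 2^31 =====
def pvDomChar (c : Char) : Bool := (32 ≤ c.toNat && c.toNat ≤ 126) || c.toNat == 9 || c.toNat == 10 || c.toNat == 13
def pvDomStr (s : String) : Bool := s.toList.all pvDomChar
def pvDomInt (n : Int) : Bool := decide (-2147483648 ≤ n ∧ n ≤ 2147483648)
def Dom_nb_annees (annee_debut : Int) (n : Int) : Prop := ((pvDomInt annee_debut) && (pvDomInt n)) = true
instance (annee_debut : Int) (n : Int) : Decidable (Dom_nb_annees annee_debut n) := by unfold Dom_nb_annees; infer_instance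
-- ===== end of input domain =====

-- B replaces A's year-by-year O(answer) scan by a closed-form leap-year count plus a
-- binary search for the n-th leap year (objective: faster, asymptotic).

-- ===== PORT A =====
def est_bissextile (a : Int) : Bool :=
  if PySem.Int.mod a 4 == 0 && !(PySem.Int.mod a 100 == 0) then true
  else if PySem.Int.mod a 400 == 0 then true
  else false

-- termination helper for A's while-loop: distance (capped at 8) to the next leap year
def gapLeap (y : Int) : Nat :=
  if est_bissextile y then 0
  else if est_bissextile (y+1) then 1
  else if est_bissextile (y+2) then 2
  else if est_bissextile (y+3) then 3
  else if est_bissextile (y+4) then 4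
  else if est_bissextile (y+5) then 5
  else if est_bissextile (y+6) then 6
  else if est_bissextile (y+7) then 7
  else 8

-- leap status depends only on the year mod 400 (termination helper, cited by gapLeap_decr)
theorem est_bissextile_congr (y i : Int) (h : y % 400 = i % 400) :
    est_bissextile y = est_bissextile i := by
  have h4 : y % 4 = i % 4 := by omega
  have h100 : y % 100 = i % 100 := by omega
  simp only [est_bissextile,
    PySem.Int.mod_eq_emod_of_pos (b := 4) (by norm_num),
    PySem.Int.mod_eq_emod_of_pos (b := 100) (by norm_num),
    PySem.Int.mod_eq_emod_of_pos (b := 400) (by norm_num), h4, h100, h]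

theorem gapLeap_congr (y i : Int) (h : y % 400 = i % 400) : gapLeap y = gapLeap i := by
  unfold gapLeap
  rw [est_bissextile_congr y i h,
      est_bissextile_congr (y+1) (i+1) (by omega),
      est_bissextile_congr (y+2) (i+2) (by omega),
      est_bissextile_congr (y+3) (i+3) (by omega),
      est_bissextile_congr (y+4) (i+4) (by omega),
      est_bissextile_congr (y+5) (i+5) (by omega),
      est_bissextile_congr (y+6) (i+6) (by omega),
      est_bissextile_congr (y+7) (i+7) (by omega)]

-- checked case split over the 400-year cycle (termination helper, cited by gapLeap_decr)
set_option maxRecDepth 40000 in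
theorem gapLeap_decr_fin : ∀ m : Fin 400, est_bissextile (m : Int) = false →
    gapLeap (((m : Int) + 1) % 400) < gapLeap (m : Int) := by decide

-- the measure of A's loop really decreases on a non-leap year (cited in decreasing_by)
theorem gapLeap_decr (y : Int) (h : est_bissextile y = false) : gapLeap (y + 1) < gapLeap y := by
  have hb : (0:Int) ≤ y % 400 ∧ y % 400 < 400 := by omega
  have hm := gapLeap_decr_fin ⟨(y % 400).toNat, by omega⟩
  have hc : (((y % 400).toNat : Int)) = y % 400 := Int.toNat_of_nonneg hb.1
  simp only [Fin.val_mk, hc] at hm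
  have h1 : est_bissextile (y % 400) = false := by
    rwa [est_bissextile_congr (y % 400) y (by omega)]
  have h2 := hm h1
  rwa [gapLeap_congr ((y % 400 + 1) % 400) (y + 1) (by omega),
       gapLeap_congr (y % 400) y (by omega)] at h2

-- A's while-loop, step for step (state n1, first_year, nb_annee)
def nbLoop (n1 : Int) (first_year : Int) (nb_annee : Int) : Int :=
  if n1 > 0 then
    if est_bissextile first_year then nbLoop (n1 - 1) (first_year + 1) (nb_annee + 1)
    else nbLoop n1 (first_year + 1) (nb_annee + 1)
  else nb_annee
termination_by (n1.toNat, gapLeap first_year)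
decreasing_by
  · exact Prod.Lex.left _ _ (by omega)
  · exact Prod.Lex.right _ (gapLeap_decr first_year (by simpa using ‹¬ est_bissextile first_year = true›))

def nb_annees (annee_debut : Int) (n : Int) : Int :=
  nbLoop n annee_debut (-1)

-- ===== PORT B =====
-- leap years in (0, y] for y ≥ 0, extended to all ints by floor division (Source B's leaps_upto)
def leapsUpto (y : Int) : Int :=
  PySem.Int.floordiv y 4 - PySem.Int.floordiv y 100 + PySem.Int.floordiv y 400

-- Source B's while-loop: binary search for the least lo with leaps_upto lo - base ≥ n
def bsLoop (base : Int) (n : Int) (lo : Int) (hi : Int) : Int :=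
  if lo < hi then
    let mid := PySem.Int.floordiv (lo + hi) 2
    if leapsUpto mid - base ≥ n then bsLoop base n lo mid
    else bsLoop base n (mid + 1) hi
  else lo
termination_by (hi - lo).toNat
decreasing_by
  all_goals
    have h1 : lo ≤ PySem.Int.floordiv (lo + hi) 2 :=
      (PySem.Int.le_floordiv_iff_mul_le (by norm_num)).mpr (by omega)
    have h2 : PySem.Int.floordiv (lo + hi) 2 < hi :=
      (PySem.Int.floordiv_lt_iff_lt_mul (by norm_num)).mpr (by omega)
    omega

def nb_annees_alt (annee_debut : Int) (n : Int) : Int :=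
  if n ≤ 0 then -1
  else
    let base := leapsUpto (annee_debut - 1)
    bsLoop base n annee_debut (annee_debut + 8 * n) - annee_debut

-- ===== PRECONDITION & SPEC =====
def Spec_nb_annees (annee_debut : Int) (n : Int) (out : Int) : Prop := out = nb_annees_alt annee_debut n
instance (annee_debut : Int) (n : Int) (out : Int) : Decidable (Spec_nb_annees annee_debut n out) := by unfold Spec_nb_annees; infer_instance

-- ===== CLAIM (what is proved, stated in full; the proofs are below) =====
def Claim_equal_nb_annees : Prop := ∀ (annee_debut : Int) (n : Int), Dom_nb_annees annee_debut n → Spec_nb_annees annee_debut n (nb_annees annee_debut n)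

-- ===== LEMMAS AND PROOFS =====

-- mathematical leap-year count in (0, y]
def F (y : Int) : Int := y / 4 - y / 100 + y / 400

theorem leapsUpto_eq (y : Int) : leapsUpto y = F y := by
  simp [leapsUpto, F, PySem.Int.floordiv_eq_ediv_of_pos (b := 4) (by norm_num),
    PySem.Int.floordiv_eq_ediv_of_pos (b := 100) (by norm_num),
    PySem.Int.floordiv_eq_ediv_of_pos (b := 400) (by norm_num)]

theorem leap_iff (y : Int) :
    est_bissextile y = true ↔ ((y % 4 = 0 ∧ y % 100 ≠ 0) ∨ y % 400 = 0) := by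
  simp only [est_bissextile,
    PySem.Int.mod_eq_emod_of_pos (b := 4) (by norm_num),
    PySem.Int.mod_eq_emod_of_pos (b := 100) (by norm_num),
    PySem.Int.mod_eq_emod_of_pos (b := 400) (by norm_num)]
  by_cases h4 : y % 4 = 0 <;> by_cases h100 : y % 100 = 0 <;> by_cases h400 : y % 400 = 0 <;>
    simp [h4, h100, h400]

theorem F_step (y : Int) : F y - F (y - 1) = (if est_bissextile y then 1 else 0) := by
  by_cases h : est_bissextile y = true
  · rw [if_pos h]
    rcases (leap_iff y).mp h with ⟨h4, h100⟩ | h400 <;> simp only [F] <;> omega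
  · rw [if_neg h]
    have h' : ¬ ((y % 4 = 0 ∧ y % 100 ≠ 0) ∨ y % 400 = 0) := fun hc => h ((leap_iff y).mpr hc)
    push_neg at h'
    simp only [F]
    omega

theorem F_succ_ge (y : Int) : F y ≤ F (y + 1) := by
  have := F_step (y + 1)
  have : F (y+1) - F y = (if est_bissextile (y+1) then 1 else 0) := by simpa using this
  split_ifs at this <;> omega

theorem F_mono {z w : Int} (h : z ≤ w) : F z ≤ F w := by
  induction w, h using Int.le_induction with
  | base => exact le_refl _
  | succ w hw ih => exact le_trans ih (F_succ_ge w)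

theorem F_gain8 (y : Int) : F y + 1 ≤ F (y + 8) := by
  simp only [F]; omega

theorem F_gain8k (x : Int) : ∀ k : Nat, F x + (k : Int) ≤ F (x + 8 * k)
  | 0 => by simp
  | (k+1) => by
      have h1 := F_gain8k x k
      have h2 := F_gain8 (x + 8 * k)
      have he : x + 8 * ((k:Int) + 1) = (x + 8 * k) + 8 := by ring
      push_cast
      rw [he]
      push_cast at h1
      omega

-- characterisation of A's loop: for n1 > 0 it returns c + (Y - y) + 1 where Y is the
-- n1-th leap year at or after y, counted by F
theorem nbLoop_spec : ∀ (n1 y c : Int), 0 < n1 →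
    ∃ Y, y ≤ Y ∧ est_bissextile Y = true ∧ F Y - F (y - 1) = n1 ∧
      nbLoop n1 y c = c + (Y - y) + 1 := by
  intro n1 y c
  induction n1, y, c using nbLoop.induct with
  | case1 n1 y c hpos hleap ih =>
    intro _
    by_cases h1 : 0 < n1 - 1
    · obtain ⟨Y, hY1, hY2, hY3, hY4⟩ := ih h1
      refine ⟨Y, by omega, hY2, ?_, ?_⟩
      · have hs := F_step y
        rw [if_pos hleap] at hs
        have : (y + 1 - 1 : Int) = y := by ring
        rw [this] at hY3
        omega
      · rw [nbLoop, if_pos hpos, if_pos hleap, hY4]; ring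
    · have hn1 : n1 = 1 := by omega
      refine ⟨y, le_refl y, hleap, ?_, ?_⟩
      · have hs := F_step y
        rw [if_pos hleap] at hs
        omega
      · rw [nbLoop, if_pos hpos, if_pos hleap, nbLoop, if_neg (by omega)]
        omega
  | case2 n1 y c hpos hleap ih =>
    intro h0
    obtain ⟨Y, hY1, hY2, hY3, hY4⟩ := ih h0
    have hlf : est_bissextile y = false := by simpa using hleap
    refine ⟨Y, by omega, hY2, ?_, ?_⟩
    · have hs := F_step y
      rw [hlf] at hs
      simp at hs
      have : (y + 1 - 1 : Int) = y := by ring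
      rw [this] at hY3
      omega
    · rw [nbLoop, if_pos hpos, if_neg (by simp [hlf]), hY4]; ring
  | case3 n1 y c hpos =>
    intro h0
    omega

-- characterisation of B's binary search
theorem bsLoop_spec (base n : Int) : ∀ (lo hi : Int), lo ≤ hi → n ≤ F hi - base →
    lo ≤ bsLoop base n lo hi ∧ bsLoop base n lo hi ≤ hi ∧
    n ≤ F (bsLoop base n lo hi) - base ∧
    (lo < bsLoop base n lo hi → ¬ n ≤ F (bsLoop base n lo hi - 1) - base) := by
  intro lo hi
  induction lo, hi using bsLoop.induct base n with
  | case1 lo hi hlt mid hmid ih =>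
    intro _ _
    rw [leapsUpto_eq] at hmid
    obtain ⟨h1, h2, h3, h4⟩ := ih (by
        have := PySem.Int.floordiv_two_mid_bounds (lo := lo) (hi := hi) (by omega)
        simp only [mid]; omega) (by simpa [mid] using hmid)
    have hrw : bsLoop base n lo hi = bsLoop base n lo mid := by
      rw [bsLoop, if_pos hlt, if_pos (by rw [leapsUpto_eq]; exact hmid)]
    rw [hrw]
    have hmhi : mid ≤ hi := by
      have := PySem.Int.floordiv_two_mid_bounds (lo := lo) (hi := hi) (by omega)
      simp only [mid]; omega
    exact ⟨h1, le_trans h2 hmhi, h3, h4⟩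
  | case2 lo hi hlt mid hmid ih =>
    intro _ hhi
    have hmid_eq : mid = PySem.Int.floordiv (lo + hi) 2 := rfl
    rw [leapsUpto_eq] at hmid
    push_neg at hmid
    have hbnd := PySem.Int.floordiv_two_mid_bounds (lo := lo) (hi := hi) (by omega)
    have hmid_lt : mid < hi := by
      -- (lo+hi)//2 < hi since lo < hi
      have : F mid - base < n := hmid
      by_contra hc
      push_neg at hc
      have : hi ≤ mid := hc
      have : n ≤ F mid - base := by
        have := F_mono this
        omega
      omega
    obtain ⟨h1, h2, h3, h4⟩ := ih (by omega) hhi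
    have hrw : bsLoop base n lo hi = bsLoop base n (mid + 1) hi := by
      rw [bsLoop, if_pos hlt, if_neg (by rw [leapsUpto_eq]; rw [← hmid_eq]; omega)]
    rw [hrw]
    refine ⟨by simp only [mid] at h1 ⊢; omega, h2, h3, ?_⟩
    intro _
    by_cases hc : mid + 1 < bsLoop base n (mid + 1) hi
    · exact h4 hc
    · have : bsLoop base n (mid + 1) hi = mid + 1 := by omega
      rw [this]
      simpa using hmid
  | case3 lo hi hge =>
    intro hle hhi
    rw [bsLoop, if_neg hge]
    have : lo = hi := by omega
    subst this
    exact ⟨le_refl _, le_refl _, hhi, by omega⟩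

-- ===== VERDICT (by name: the statement is the Claim_ definition above) =====
theorem nb_annees_spec : Claim_equal_nb_annees := by
  intro a n _
  unfold Spec_nb_annees nb_annees nb_annees_alt
  by_cases hn : n ≤ 0
  · rw [if_pos hn, nbLoop, if_neg (by omega)]
  · rw [if_neg hn]
    push_neg at hn
    obtain ⟨Y, hY1, hY2, hY3, hY4⟩ := nbLoop_spec n a (-1) hn
    rw [hY4]
    show (-1 : Int) + (Y - a) + 1 = bsLoop (leapsUpto (a - 1)) n a (a + 8 * n) - a
    rw [leapsUpto_eq]
    have hhi : n ≤ F (a + 8 * n) - F (a - 1) := by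
      have h8 : F (a - 1) + n ≤ F (a - 1 + 8 * n) := by
        have := F_gain8k (a - 1) n.toNat
        have hcast : (n.toNat : Int) = n := Int.toNat_of_nonneg (by omega)
        rw [hcast] at this
        exact this
      have hm : F (a - 1 + 8 * n) ≤ F (a + 8 * n) := F_mono (by omega)
      omega
    obtain ⟨h1, h2, h3, h4⟩ := bsLoop_spec (F (a-1)) n a (a + 8 * n) (by omega) hhi
    set r := bsLoop (F (a-1)) n a (a + 8 * n) with hr
    -- show r = Y, hence both results are Y - a
    have hFY : F Y - F (a - 1) = n := hY3
    -- F (Y-1) - F(a-1) = n - 1 since Y is leap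
    have hstep := F_step Y
    rw [hY2] at hstep
    simp at hstep
    have hYr : Y = r := by
      by_cases hc : Y < r
      · -- then Y ≤ r - 1; r > a so ¬ n ≤ F (r-1) - base; but F Y ≥ n gives F(r-1) ≥ n
        have hra : a < r := by omega
        have := h4 hra
        have hm : F Y ≤ F (r - 1) := F_mono (by omega)
        omega
      · by_cases hc2 : r < Y
        · -- r ≤ Y - 1 so F r ≤ F (Y-1) = F Y - 1, contradicting n ≤ F r - base
          have hm : F r ≤ F (Y - 1) := F_mono (by omega)
          omega
        · omega
    omega
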